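-- pv_equiv track=rewrite | github.com/asadbek066/youtube-study-lab | youtube_study_tool/transcripts.py | _candidate_language_codes
-- ===== SOURCE A (Python) =====
-- def _candidate_language_codes(
--
--     preferred_languages: tuple[str, ...],
--     subtitles: dict,
--     automatic_captions: dict,
-- ) -> list[str]:
--     available_codes = list(dict.fromkeys([*subtitles.keys(), *automatic_captions.keys()]))
--     if not available_codes:
--         return []
--
--     ordered: list[str] = []
--     for language in preferred_languages or ("en", "en-US", "en-GB"):
--         normalized = language.lower()
--         for code in available_codes:
--             lower_code = str(code).lower()
--             if lower_code == normalized or lower_code.startswith(normalized) or normalized.startswith(lower_code):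
--                 if code not in ordered:
--                     ordered.append(code)
--
--     for fallback_code in available_codes:
--         if fallback_code not in ordered:
--             ordered.append(fallback_code)
--     return ordered
-- ===== SOURCE B (Python) =====
-- def _match(code: str, lang: str) -> bool:
--     lc = str(code).lower()
--     n = lang.lower()
--     return lc == n or lc.startswith(n) or n.startswith(lc)
--
--
-- def _candidate_language_codes(
--     preferred_languages,
--     subtitles,
--     automatic_captions,
-- ):
--     available_codes = list(dict.fromkeys([*subtitles.keys(), *automatic_captions.keys()]))
--     prefs = list(preferred_languages) or ["en", "en-US", "en-GB"]
--
--     def rank(code):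
--         return next((i for i, lang in enumerate(prefs) if _match(code, lang)), len(prefs))
--
--     ranked = [(rank(code), code) for code in available_codes]
--     return [code for r in range(len(prefs) + 1) for (rank_code, code) in ranked if rank_code == r]
-- ===== Notes on version B (the rewrite author's own statement) =====
-- stated objective: simpler
-- what changed: Replaces A's nested preference-by-preference append-if-absent loops plus a separate fallback pass with a single rank function (first matching preference index, len(prefs) if none) and one bucket comprehension over ranks, relying on the deduped list's order within each bucket.
import Mathlib
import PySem

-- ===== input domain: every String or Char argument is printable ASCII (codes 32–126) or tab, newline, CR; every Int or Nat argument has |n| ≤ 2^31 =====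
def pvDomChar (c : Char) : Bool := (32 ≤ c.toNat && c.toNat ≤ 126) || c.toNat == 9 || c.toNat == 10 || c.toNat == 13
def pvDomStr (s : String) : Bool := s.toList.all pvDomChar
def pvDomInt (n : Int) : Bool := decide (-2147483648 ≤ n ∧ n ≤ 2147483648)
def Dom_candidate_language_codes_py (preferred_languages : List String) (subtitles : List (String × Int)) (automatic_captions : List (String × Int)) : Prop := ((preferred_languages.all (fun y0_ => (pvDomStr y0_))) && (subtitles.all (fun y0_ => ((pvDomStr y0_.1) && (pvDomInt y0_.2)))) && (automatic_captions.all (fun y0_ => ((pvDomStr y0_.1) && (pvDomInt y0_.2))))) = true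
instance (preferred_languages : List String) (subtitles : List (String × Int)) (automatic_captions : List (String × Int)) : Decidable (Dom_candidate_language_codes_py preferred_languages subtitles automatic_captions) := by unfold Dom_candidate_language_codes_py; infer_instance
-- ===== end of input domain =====

-- ===== PORT A =====
-- B is a simpler re-implementation: rank each code by its first matching preference and bucket, instead of A's nested append-if-absent loops.
-- shared match condition: exactly A's `lower_code == normalized or lower_code.startswith(normalized) or normalized.startswith(lower_code)`
def pvMatch (code lang : String) : Bool :=
  let normalized := PySem.Str.lower lang
  let lower_code := PySem.Str.lower code
  lower_code == normalized || PySem.Str.startswith lower_code normalized || PySem.Str.startswith normalized lower_code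

def candidate_language_codes_py (preferred_languages : List String) (subtitles : List (String × Int)) (automatic_captions : List (String × Int)) : List String :=
  let available_codes := PySem.List.dedup (subtitles.map Prod.fst ++ automatic_captions.map Prod.fst)
  if available_codes = [] then []
  else
    let prefs := if preferred_languages = [] then ["en", "en-US", "en-GB"] else preferred_languages
    let ordered := prefs.foldl (fun ordered language =>
      available_codes.foldl (fun ordered code =>
        if pvMatch code language then
          (if code ∈ ordered then ordered else ordered ++ [code])
        else ordered) ordered) []
    available_codes.foldl (fun ordered fallback_code =>
      if fallback_code ∈ ordered then ordered else ordered ++ [fallback_code]) ordered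

-- ===== PORT B =====
-- Source B's rank(code) = next((i for i,lang in enumerate(prefs) if _match(code,lang)), len(prefs))
def pvRank (prefs : List String) (code : String) : Int :=
  ((prefs.findIdx (fun lang => pvMatch code lang) : Nat) : Int)

def candidate_language_codes_py_alt (preferred_languages : List String) (subtitles : List (String × Int)) (automatic_captions : List (String × Int)) : List String :=
  let available_codes := PySem.List.dedup (subtitles.map Prod.fst ++ automatic_captions.map Prod.fst)
  let prefs := if preferred_languages = [] then ["en", "en-US", "en-GB"] else preferred_languages
  let ranked := available_codes.map (fun code => (pvRank prefs code, code))
  (PySem.List.pyRange 0 (PySem.List.len prefs + 1) 1).flatMap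
    (fun r => (ranked.filter (fun p => p.1 == r)).map (fun p => p.2))

-- ===== PRECONDITION & SPEC =====

def Spec_candidate_language_codes_py (preferred_languages : List String) (subtitles : List (String × Int)) (automatic_captions : List (String × Int)) (out : List String) : Prop := out = candidate_language_codes_py_alt preferred_languages subtitles automatic_captions
instance (preferred_languages : List String) (subtitles : List (String × Int)) (automatic_captions : List (String × Int)) (out : List String) : Decidable (Spec_candidate_language_codes_py preferred_languages subtitles automatic_captions out) := by unfold Spec_candidate_language_codes_py; infer_instance

-- ===== CLAIM (what is proved, stated in full; the proofs are below) =====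
def Claim_equal_candidate_language_codes_py : Prop := ∀ (preferred_languages : List String) (subtitles : List (String × Int)) (automatic_captions : List (String × Int)), Dom_candidate_language_codes_py preferred_languages subtitles automatic_captions → Spec_candidate_language_codes_py preferred_languages subtitles automatic_captions (candidate_language_codes_py preferred_languages subtitles automatic_captions)

-- ===== LEMMAS AND PROOFS =====

-- A's append-if-absent loop over a duplicate-free list, with an outer guard q
theorem pvFoldAppend (avail : List String) (q : String → Bool) (acc : List String)
    (h : avail.Nodup) :
    avail.foldl (fun o c => if q c then (if c ∈ o then o else o ++ [c]) else o) acc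
      = acc ++ avail.filter (fun c => q c && !decide (c ∈ acc)) := by
  induction avail generalizing acc with
  | nil => simp
  | cons a l ih =>
    simp only [List.nodup_cons] at h
    simp only [List.foldl_cons, List.filter_cons]
    by_cases hq : q a = true
    · by_cases hm : a ∈ acc
      · rw [if_pos hq, if_pos hm, ih acc h.2]
        simp [hq, hm]
      · rw [if_pos hq, if_neg hm, ih (acc ++ [a]) h.2,
          List.filter_congr (q := fun c => q c && !decide (c ∈ acc))
            (fun c hc => by
              have hne : c ≠ a := fun he => h.1 (he ▸ hc)
              simp [hne])]
        simp [hq, hm, List.append_assoc]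
    · rw [if_neg hq, ih acc h.2]
      simp [hq]

-- membership in the bucket concatenation
theorem pvMemBuckets (avail : List String) (f : String → Nat) (k : Nat) (c : String) :
    c ∈ (List.range k).flatMap (fun r => avail.filter (fun x => f x == r))
      ↔ c ∈ avail ∧ f c < k := by
  simp only [List.mem_flatMap, List.mem_range, List.mem_filter, beq_iff_eq]
  constructor
  · rintro ⟨r, hr, hc, he⟩; exact ⟨hc, he ▸ hr⟩
  · rintro ⟨hc, hf⟩; exact ⟨f c, hf, hc, rfl⟩

-- the outer loop of A produces the codes bucketed by first-matching-preference index
theorem pvOuterLoop (P : List String) (avail : List String) (acc : List String)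
    (h : avail.Nodup) :
    P.foldl (fun ordered language =>
        avail.foldl (fun o c => if pvMatch c language then (if c ∈ o then o else o ++ [c]) else o)
          ordered) acc
      = acc ++ (List.range P.length).flatMap
          (fun r => avail.filter (fun c => !decide (c ∈ acc) && (P.findIdx (fun lang => pvMatch c lang) == r))) := by
  induction P generalizing acc with
  | nil => simp
  | cons p Ps ih =>
    simp only [List.foldl_cons]
    rw [pvFoldAppend avail (fun c => pvMatch c p) acc h, ih _ ]
    rw [List.length_cons, List.range_succ_eq_map, List.flatMap_cons, List.flatMap_map]
    rw [List.append_assoc]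
    congr 1
    congr 1
    · apply List.filter_congr
      intro c hc
      rw [List.findIdx_cons]
      by_cases hp : pvMatch c p <;> simp [hp, Bool.and_comm]
    · apply List.flatMap_congr
      intro r hr
      apply List.filter_congr
      intro c hc
      rw [List.findIdx_cons]
      by_cases hin : c ∈ acc
      · simp [hin, List.mem_append]
      · by_cases hp : pvMatch c p = true
        · simp [hin, hp, List.mem_append, List.mem_filter, hc]
        · simp [hin, hp, List.mem_append, List.mem_filter]

theorem candidate_language_codes_eq (preferred_languages : List String)
    (subtitles : List (String × Int)) (automatic_captions : List (String × Int)) :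
    candidate_language_codes_py preferred_languages subtitles automatic_captions
      = candidate_language_codes_py_alt preferred_languages subtitles automatic_captions := by
  unfold candidate_language_codes_py candidate_language_codes_py_alt
  set avail := PySem.List.dedup (subtitles.map Prod.fst ++ automatic_captions.map Prod.fst) with havail
  have hnd : avail.Nodup := PySem.List.nodup_dedup _
  set P := if preferred_languages = [] then ["en", "en-US", "en-GB"] else preferred_languages with hP
  -- B's range over Int becomes a Nat range of buckets
  have hlen : PySem.List.len P + 1 = ((P.length + 1 : Nat) : Int) := by
    simp [PySem.List.len_eq]
  have hB : (PySem.List.pyRange 0 (PySem.List.len P + 1) 1).flatMap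
      (fun r => ((avail.map (fun code => (pvRank P code, code))).filter (fun p => p.1 == r)).map (fun p => p.2))
      = (List.range (P.length + 1)).flatMap
          (fun r => avail.filter (fun c => P.findIdx (fun lang => pvMatch c lang) == r)) := by
    rw [hlen, PySem.List.pyRange_zero_natCast, List.flatMap_map]
    apply List.flatMap_congr
    intro r hr
    simp only [List.filter_map, List.map_map, Function.comp_def, List.map_id_fun']
    apply List.filter_congr
    intro c hc
    simp [pvRank]
  by_cases he : avail = []
  · rw [if_pos he, hB]
    simp [he]
  · rw [if_neg he, hB]
    simp only []
    rw [pvOuterLoop P avail [] hnd]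
    simp only [List.not_mem_nil, decide_false, Bool.not_false, Bool.true_and, List.nil_append]
    have hfun : (fun (o : List String) (c : String) => if c ∈ o then o else o ++ [c])
        = (fun o c => if (fun _ => true) c then (if c ∈ o then o else o ++ [c]) else o) := by
      funext o c; simp
    rw [hfun, pvFoldAppend avail (fun _ => true) _ hnd]
    rw [List.range_succ, List.flatMap_append, List.flatMap_singleton]
    congr 1
    apply List.filter_congr
    intro c hc
    have hle := List.findIdx_le_length (p := fun lang => pvMatch c lang) (xs := P)
    have hmem := pvMemBuckets avail (fun c => P.findIdx (fun lang => pvMatch c lang)) P.length c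
    simp only [Bool.true_and, hc, true_and] at hmem ⊢
    by_cases hlt : P.findIdx (fun lang => pvMatch c lang) < P.length
    · simp [hmem.2 hlt, Nat.ne_of_lt hlt]
    · have heq : P.findIdx (fun lang => pvMatch c lang) = P.length := by omega
      simp [heq]

-- ===== VERDICT (by name: the statement is the Claim_ definition above) =====
theorem candidate_language_codes_py_spec : Claim_equal_candidate_language_codes_py := by
  intro p s a _
  unfold Spec_candidate_language_codes_py
  exact candidate_language_codes_eq p s a
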